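-- pv_equiv track=rewrite | github.com/Sdas08217/GFG-POTD | Jun_2025/Jun_17.py | minimumCoins
-- ===== SOURCE A (Python) =====
-- import bisect
--
-- def minimumCoins(arr, k):
--     arr.sort()
--     n = len(arr)
--
--     # Prefix sum of sorted array
--     prefix = [0] * (n + 1)
--     for i in range(n):
--         prefix[i + 1] = prefix[i] + arr[i]
--
--     total = prefix[n]
--     ans = float('inf')
--
--     for i in range(n):
--         base = arr[i]
--         max_allowed = base + k
--
--         # Find first index where arr[j] > base + k
--         right = bisect.bisect_right(arr, max_allowed)
--
--         # Coins to remove from smaller piles (before i)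
--         remove_left = prefix[i]
--
--         # Coins to remove from larger piles (after right-1)
--         remove_right = total - prefix[right] - (max_allowed * (n - right))
--
--         total_remove = remove_left + remove_right
--         ans = min(ans, total_remove)
--
--     return ans
-- ===== SOURCE B (Python) =====
-- def minimumCoins(arr, k):
--     # Brute-force per-candidate summation: sort, then for each base pile sum the
--     # excess above base+k directly, carrying the removed-smaller total in an accumulator.
--     arr.sort()
--     best = None
--     removed_left = 0
--     for b in arr:
--         cap = b + k
--         over = 0
--         for y in arr:
--             if y > cap:
--                 over += y - cap
--         cost = removed_left + over
--         if best is None or cost < best: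
--             best = cost
--         removed_left += b
--     return float('inf') if best is None else best
-- ===== Notes on version B (the rewrite author's own statement) =====
-- stated objective: simpler
-- what changed: Drops the prefix-sum table and the bisect binary search entirely: for each candidate base B re-computes the excess over base+k by a direct inner scan and carries the removed-smaller sum in a running accumulator (brute-force O(n^2) scan vs prefix-sum + binary-search arithmetic).
-- outside the precondition, e.g. on minimumCoins([], 5): A returns inf, B returns inf
import Mathlib
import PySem

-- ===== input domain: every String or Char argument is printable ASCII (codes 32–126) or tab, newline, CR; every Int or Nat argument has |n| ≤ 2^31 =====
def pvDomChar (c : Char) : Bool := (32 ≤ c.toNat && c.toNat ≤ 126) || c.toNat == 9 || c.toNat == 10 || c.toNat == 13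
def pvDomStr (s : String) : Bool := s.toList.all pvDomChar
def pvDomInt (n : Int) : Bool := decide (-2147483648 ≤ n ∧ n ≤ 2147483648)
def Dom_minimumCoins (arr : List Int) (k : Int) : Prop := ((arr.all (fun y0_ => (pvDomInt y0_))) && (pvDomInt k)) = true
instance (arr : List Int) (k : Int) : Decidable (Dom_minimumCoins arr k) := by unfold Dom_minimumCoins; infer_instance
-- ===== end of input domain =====

-- B drops A's prefix-sum table and bisect binary search: per candidate base it sums the
-- excess over base+k by a direct inner scan, carrying the removed-smaller sum in an
-- accumulator (simpler brute-force decomposition, same return value).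
-- Both A and B sort `arr` in place; the equivalence proved here is about the return value only.


-- ===== PORT A =====
-- ans starts as float('inf') in Python: modelled as `none`; on nonempty input (Pre_) the
-- result is an Int and the final match returns it (`none → 0` is never reached under Pre_).
def minimumCoins (arr : List Int) (k : Int) : Int :=
  let s := PySem.List.sorted arr (fun x => x)
  let n := s.length
  let pre := List.scanl (· + ·) 0 s
  let total := pre.getD n 0
  let ans := (List.range n).foldl (fun ans i =>
      let base := s.getD i 0
      let maxAllowed := base + k
      let right := PySem.List.bisectRight s maxAllowed
      let removeLeft := pre.getD i 0
      let removeRight := total - pre.getD right 0 - maxAllowed * ((n : Int) - (right : Int))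
      let totalRemove := removeLeft + removeRight
      some (match ans with | none => totalRemove | some a => min a totalRemove))
    (none : Option Int)
  match ans with | some a => a | none => 0

-- ===== PORT B =====
-- best starts as None; the `for b in arr` / inner `for y in arr` loops of Source B become
-- folds over the (in-place sorted) list; `float('inf')` on empty is outside Pre_ (`none → 0`).
def minimumCoins_alt (arr : List Int) (k : Int) : Int :=
  let s := PySem.List.sorted arr (fun x => x)
  let st := s.foldl (fun st b =>
      let cap := b + k
      let excess := s.foldl (fun ov y => if cap < y then ov + (y - cap) else ov) 0
      let cost := st.2 + excess
      let best := match st.1 with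
        | none => some cost
        | some a => if cost < a then some cost else some a
      (best, st.2 + b))
    ((none : Option Int), (0 : Int))
  match st.1 with | some a => a | none => 0

-- ===== PRECONDITION & SPEC =====
-- Pre_ excludes only the empty list, on which Python A returns float('inf'), not an int.
def Pre_minimumCoins (arr : List Int) (k : Int) : Prop := arr ≠ []
instance (arr : List Int) (k : Int) : Decidable (Pre_minimumCoins arr k) := by unfold Pre_minimumCoins; infer_instance
def pvWitness_minimumCoins : List Int × Int := ([3, 1, 7], 2)

def Spec_minimumCoins (arr : List Int) (k : Int) (out : Int) : Prop := out = minimumCoins_alt arr k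
instance (arr : List Int) (k : Int) (out : Int) : Decidable (Spec_minimumCoins arr k out) := by unfold Spec_minimumCoins; infer_instance

-- ===== CLAIM (what is proved, stated in full; the proofs are below) =====
def Claim_equal_minimumCoins : Prop := ∀ (arr : List Int) (k : Int), Dom_minimumCoins arr k → Pre_minimumCoins arr k → Spec_minimumCoins arr k (minimumCoins arr k)

-- ===== LEMMAS AND PROOFS =====

-- prefix-sum table: the scanl entry at i is the sum of the first i elements
lemma scanl_getD_sum : ∀ (s : List Int) (a : Int) (i : Nat), i ≤ s.length →
    (List.scanl (· + ·) a s).getD i 0 = a + (s.take i).sum := by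
  intro s
  induction s with
  | nil =>
    intro a i hi
    have : i = 0 := Nat.le_zero.mp hi
    subst this
    simp [List.scanl]
  | cons x t ih =>
    intro a i hi
    cases i with
    | zero => simp [List.scanl]
    | succ i' =>
      rw [List.scanl_cons, List.getD_cons_succ, ih (a + x) i' (by simpa using hi)]
      simp [List.sum_cons]
      ring

-- B's inner scan: summing the excess over cap equals the suffix arithmetic of A,
-- given the split point r (all indices < r are ≤ cap, all indices ≥ r are > cap)
lemma foldl_over_eq : ∀ (s : List Int) (cap : Int) (r : Nat) (acc : Int), r ≤ s.length →
    (∀ (j : Nat) (hj : j < s.length), j < r → s[j] ≤ cap) →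
    (∀ (j : Nat) (hj : j < s.length), r ≤ j → cap < s[j]) →
    s.foldl (fun ov y => if cap < y then ov + (y - cap) else ov) acc
      = acc + (s.drop r).sum - cap * ((s.length : Int) - (r : Int)) := by
  intro s
  induction s with
  | nil =>
    intro cap r acc hr _ _
    have : r = 0 := Nat.le_zero.mp hr
    subst this
    simp
  | cons x t ih =>
    intro cap r acc hr hle hgt
    cases r with
    | zero =>
      have hx : cap < x := hgt 0 (by simp) (Nat.zero_le _)
      rw [List.foldl_cons, if_pos hx,
        ih cap 0 (acc + (x - cap)) (Nat.zero_le _)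
          (fun j hj h => absurd h (Nat.not_lt_zero j))
          (fun j hj _ => by
            have := hgt (j + 1) (by simpa using Nat.succ_lt_succ hj) (Nat.zero_le _)
            simpa using this)]
      simp only [List.drop_zero, List.sum_cons, List.length_cons]
      push_cast
      ring
    | succ r' =>
      have hx : x ≤ cap := hle 0 (by simp) (Nat.succ_pos _)
      rw [List.foldl_cons, if_neg (not_lt.mpr hx),
        ih cap r' acc (by simpa using hr)
          (fun j hj h => by
            have := hle (j + 1) (by simpa using Nat.succ_lt_succ hj) (by omega)
            simpa using this)
          (fun j hj h => by
            have := hgt (j + 1) (by simpa using Nat.succ_lt_succ hj) (by omega)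
            simpa using this)]
      simp only [List.drop_succ_cons, List.length_cons]
      push_cast
      ring

-- one min-update step: B's if-based update equals A's `min` update
lemma step_min_eq (ans : Option Int) (c : Int) :
    (match ans with
      | none => some c
      | some a => if c < a then some c else some a)
    = some (match ans with | none => c | some a => min a c) := by
  cases ans with
  | none => rfl
  | some a =>
    simp only [Int.min_def]
    split_ifs <;> first | rfl | (exfalso; omega)

-- main fold equivalence: A's indexed fold over range' equals B's element fold with
-- the running removed-left accumulator, in lock step
lemma fold_main (s pre : List Int) (total k : Int) (n : Nat)
    (hn : n = s.length)
    (hpre : ∀ i : Nat, i ≤ n → pre.getD i 0 = (s.take i).sum)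
    (htot : total = s.sum)
    (hs : s.Pairwise (· ≤ ·)) :
    ∀ (d i : Nat) (ans : Option Int), i ≤ n → n - i = d →
    (List.range' i (n - i)).foldl (fun ans i =>
        let base := s.getD i 0
        let maxAllowed := base + k
        let right := PySem.List.bisectRight s maxAllowed
        let removeLeft := pre.getD i 0
        let removeRight := total - pre.getD right 0 - maxAllowed * ((n : Int) - (right : Int))
        let totalRemove := removeLeft + removeRight
        some (match ans with | none => totalRemove | some a => min a totalRemove)) ans
    = ((s.drop i).foldl (fun st b =>
        let cap := b + k
        let excess := s.foldl (fun ov y => if cap < y then ov + (y - cap) else ov) 0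
        let cost := st.2 + excess
        let best := match st.1 with
          | none => some cost
          | some a => if cost < a then some cost else some a
        (best, st.2 + b)) (ans, (s.take i).sum)).1 := by
  intro d
  induction d with
  | zero =>
    intro i ans hi hd
    have : i = n := by omega
    subst this
    rw [Nat.sub_self]
    rw [hn, List.drop_length]
    rfl
  | succ d ih =>
    intro i ans hi hd
    have hilt : i < n := by omega
    have hiltl : i < s.length := by omega
    rw [hd, List.range'_succ, List.drop_eq_getElem_cons hiltl]
    simp only [List.foldl_cons]
    have hbase : s.getD i 0 = s[i] := List.getD_eq_getElem s 0 hiltl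
    rw [hbase]
    obtain ⟨hrle, hrlt, hrgt⟩ := PySem.List.bisectRight_spec s (s[i] + k) hs
    set r := PySem.List.bisectRight s (s[i] + k) with hrdef
    have hover := foldl_over_eq s (s[i] + k) r 0 hrle hrlt hrgt
    have hcost : pre.getD i 0 + (total - pre.getD r 0 - (s[i] + k) * ((n : Int) - (r : Int)))
        = (s.take i).sum + s.foldl (fun ov y => if s[i] + k < y then ov + (y - (s[i] + k)) else ov) 0 := by
      have h1 : pre.getD r 0 = (s.take r).sum := hpre r (by omega)
      have h2 : (s.take r).sum + (s.drop r).sum = s.sum := by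
        rw [← List.sum_append, List.take_append_drop]
      rw [hover, hpre i (by omega), h1, htot, hn, ← h2]
      ring
    have hacc : (s.take i).sum + s[i] = (s.take (i + 1)).sum := by
      exact (List.sum_take_succ s i hiltl).symm
    have hd' : n - (i + 1) = d := by omega
    rw [step_min_eq ans, ← hcost, hacc, show d = n - (i + 1) by omega]
    exact ih (i + 1) _ (by omega) hd'

-- ===== VERDICT (by name: the statement is the Claim_ definition above) =====
theorem minimumCoins_spec : Claim_equal_minimumCoins := by
  intro arr k _ _
  unfold Spec_minimumCoins minimumCoins minimumCoins_alt
  simp only []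
  set s := PySem.List.sorted arr (fun x => x) with hsdef
  have hs : s.Pairwise (· ≤ ·) := PySem.List.sorted_pairwise arr (fun x => x)
  have hpre : ∀ i : Nat, i ≤ s.length → (List.scanl (· + ·) 0 s).getD i 0 = (s.take i).sum := by
    intro i hi
    rw [scanl_getD_sum s 0 i hi]
    ring
  have htot : (List.scanl (· + ·) 0 s).getD s.length 0 = s.sum := by
    rw [hpre s.length (Nat.le_refl _), List.take_length]
  have hmain := fold_main s (List.scanl (· + ·) 0 s) ((List.scanl (· + ·) 0 s).getD s.length 0) k
    s.length rfl hpre htot hs s.length 0 none (Nat.zero_le _) (Nat.sub_zero _)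
  rw [Nat.sub_zero, ← List.range_eq_range'] at hmain
  rw [hmain]
  rfl
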